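-- pv_equiv track=rewrite | github.com/Blackpenguin46/Archangel | core/authorization_validator.py | _is_target_allowed
-- ===== SOURCE A (Python) =====
-- from typing import Dict, List, Any, Optional, Set, Tuple
--
-- def _is_target_allowed(target: str, allowed_targets: List[str]) -> bool:
--     """Check if target is allowed by scope"""
--     if "*" in allowed_targets:
--         return True
--
--     for allowed in allowed_targets:
--         if allowed.endswith("*"):
--             if target.startswith(allowed[:-1]):
--                 return True
--         elif target == allowed:
--             return True
--
--     return False
-- ===== SOURCE B (Python) =====
-- def _is_target_allowed(target, allowed_targets):
--     """Allowed iff target occurs literally among the non-wildcard patterns, or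
--     some prefix of target followed by '*' occurs among the patterns; only
--     prefix lengths that occur among the wildcard patterns are probed."""
--     pool = set(allowed_targets)
--     if not target.endswith("*") and target in pool:
--         return True
--     lengths = {len(p) - 1 for p in pool if p.endswith("*")}
--     return any(i <= len(target) and target[:i] + "*" in pool for i in lengths)
-- ===== Notes on version B (the rewrite author's own statement) =====
-- stated objective: alternative
-- what changed: B inverts the traversal: instead of scanning the pattern list and testing each pattern against the target, it pools the patterns in a set once, probes the set with the target itself, and then probes it with 'prefix + "*"' for each candidate prefix length drawn from the wildcard patterns, so the per-pattern startswith/equality scan disappears.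
import Mathlib
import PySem

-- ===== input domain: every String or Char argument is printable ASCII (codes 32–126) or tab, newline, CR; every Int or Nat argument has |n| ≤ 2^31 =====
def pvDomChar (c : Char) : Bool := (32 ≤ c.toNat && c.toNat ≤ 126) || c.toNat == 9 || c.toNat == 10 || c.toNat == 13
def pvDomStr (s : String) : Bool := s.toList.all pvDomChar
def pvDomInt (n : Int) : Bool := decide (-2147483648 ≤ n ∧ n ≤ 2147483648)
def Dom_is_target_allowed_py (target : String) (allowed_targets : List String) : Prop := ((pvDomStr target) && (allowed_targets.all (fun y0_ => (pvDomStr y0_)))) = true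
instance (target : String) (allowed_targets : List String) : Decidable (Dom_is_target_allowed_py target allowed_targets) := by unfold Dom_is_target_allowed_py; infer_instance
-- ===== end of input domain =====

-- B inverts the traversal: instead of scanning the patterns and testing each against the
-- target, it puts the patterns in a set and probes it with each prefix of the target +"*"
-- (alternative decomposition; no speed claim).
-- ===== PORT A =====
-- A: scan the pattern list with a '*' fast-path, returning on the first matching entry.
def is_target_allowed_py_loop (target : String) : List String → Bool
  | [] => false
  | allowed :: rest =>
    if PySem.Str.endswith allowed "*" then
      if PySem.Str.startswith target (PySem.Str.slice allowed none (some (-1))) then true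
      else is_target_allowed_py_loop target rest
    else if target == allowed then true
    else is_target_allowed_py_loop target rest

def is_target_allowed_py (target : String) (allowed_targets : List String) : Bool :=
  if allowed_targets.contains "*" then true
  else is_target_allowed_py_loop target allowed_targets

-- ===== PORT B =====
-- B: pool the patterns in a set; literal probe for the target itself, then a wildcard
-- probe 'prefix + "*"' for each candidate prefix length drawn from the wildcard patterns.
-- 'target[:i] + "*"' is built on the code-point list (String.ofList of slice ++ ['*']): exact.
def is_target_allowed_py_alt (target : String) (allowed_targets : List String) : Bool :=
  let pool : PySem.Set String := PySem.Set.ofList allowed_targets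
  if (!PySem.Str.endswith target "*") && PySem.Set.contains pool target then true
  else
    let lengths : PySem.Set Int := PySem.Set.ofList
      ((pool.filter (fun p => PySem.Str.endswith p "*")).map (fun p => PySem.Str.len p - 1))
    lengths.any (fun i =>
      decide (i ≤ PySem.Str.len target) &&
      PySem.Set.contains pool
        (String.ofList (PySem.List.slice target.toList none (some i) ++ ['*'])))

-- ===== PRECONDITION & SPEC =====
def Spec_is_target_allowed_py (target : String) (allowed_targets : List String) (out : Bool) : Prop := out = is_target_allowed_py_alt target allowed_targets
instance (target : String) (allowed_targets : List String) (out : Bool) : Decidable (Spec_is_target_allowed_py target allowed_targets out) := by unfold Spec_is_target_allowed_py; infer_instance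

-- ===== CLAIM (what is proved, stated in full; the proofs are below) =====
def Claim_equal_is_target_allowed_py : Prop := ∀ (target : String) (allowed_targets : List String), Dom_is_target_allowed_py target allowed_targets → Spec_is_target_allowed_py target allowed_targets (is_target_allowed_py target allowed_targets)

-- ===== LEMMAS AND PROOFS =====

-- A's per-entry test (the common characterisation both ports are reduced to)
def pvMatch (target : String) (a : String) : Bool :=
  if PySem.Str.endswith a "*" then PySem.Str.startswith target (PySem.Str.slice a none (some (-1)))
  else target == a

theorem loopA_eq_any (target : String) (l : List String) :
    is_target_allowed_py_loop target l = l.any (pvMatch target) := by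
  induction l with
  | nil => rfl
  | cons a rest ih =>
    rw [is_target_allowed_py_loop, List.any_cons, pvMatch]
    split_ifs with h1 h2 h3
    · rw [h2, Bool.true_or]
    · rw [Bool.not_eq_true] at h2
      rw [h2, Bool.false_or, ih]
    · rw [h3, Bool.true_or]
    · rw [Bool.not_eq_true] at h3
      rw [h3, Bool.false_or, ih]

theorem match_star (target : String) : pvMatch target "*" = true := by
  simp only [pvMatch]
  have h1 : PySem.Str.endswith "*" "*" = true := by decide
  have h2 : (PySem.Str.slice "*" none (some (-1))) = "" := by decide
  rw [if_pos h1, h2]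
  simp [PySem.Chars.startswith_iff]

-- a prefix-probe string always satisfies A's per-entry test
theorem match_probe (target : String) (i : Int) (h0 : 0 ≤ i) :
    pvMatch target (String.ofList (PySem.List.slice target.toList none (some i) ++ ['*'])) = true := by
  rw [PySem.List.slice_to _ h0]
  set p := target.toList.take i.toNat with hp
  simp only [pvMatch]
  have hend : PySem.Str.endswith (String.ofList (p ++ ['*'])) "*" = true := by
    simp [PySem.Chars.endswith_iff]
  rw [if_pos hend]
  simp [PySem.Chars.startswith_iff, PySem.List.slice_to_neg_one, hp, List.take_prefix]

-- any entry satisfying A's test is found by B's probes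
theorem probe_of_match (target a : String) (h : pvMatch target a = true) :
    (a = target ∧ PySem.Str.endswith target "*" = false) ∨
    ∃ i : Int, 0 ≤ i ∧ i ≤ (target.toList.length : Int) ∧
      a = String.ofList (PySem.List.slice target.toList none (some i) ++ ['*']) := by
  simp only [pvMatch] at h
  by_cases he : PySem.Str.endswith a "*" = true
  · rw [if_pos he] at h
    right
    have hsuf : ['*'] <:+ a.toList := by simpa [PySem.Chars.endswith_iff] using he
    obtain ⟨p, hpa⟩ := hsuf
    have hpre : (PySem.Str.slice a none (some (-1))).toList <+: target.toList := by
      simpa [PySem.Chars.startswith_iff] using h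
    have hdrop : (PySem.Str.slice a none (some (-1))).toList = p := by
      rw [PySem.Str.slice_to_neg_one, ← hpa]
      simp
    rw [hdrop] at hpre
    refine ⟨(p.length : Int), by positivity, ?_, ?_⟩
    · exact_mod_cast hpre.length_le
    · rw [PySem.List.slice_to _ (by positivity)]
      have : target.toList.take (p.length : Int).toNat = p := by
        rw [Int.toNat_natCast]
        exact (List.prefix_iff_eq_take.mp hpre).symm
      rw [this, hpa, String.ofList_toList]
  · rw [if_neg he] at h
    left
    have ha : a = target := (beq_iff_eq.mp h).symm
    subst ha
    exact ⟨rfl, by simpa using he⟩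

theorem alt_iff (target : String) (l : List String) :
    is_target_allowed_py_alt target l = true ↔ ∃ a ∈ l, pvMatch target a = true := by
  simp only [is_target_allowed_py_alt]
  have hc : ∀ s : String, PySem.Set.contains (PySem.Set.ofList l) s = true ↔ s ∈ l := by
    intro s
    rw [PySem.Set.contains_iff, PySem.Set.mem_ofList]
  constructor
  · intro hB
    split_ifs at hB with hif
    · obtain ⟨he, hmem⟩ := Bool.and_eq_true_iff.mp hif
      refine ⟨target, (hc target).mp hmem, ?_⟩
      simp only [pvMatch]
      rw [if_neg (by simpa using he)]
      simp
    · obtain ⟨i, hi, hprobe⟩ := List.any_eq_true.mp hB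
      obtain ⟨hile, hmem⟩ := Bool.and_eq_true_iff.mp hprobe
      -- i comes from a wildcard pattern's length, hence 0 ≤ i
      have h0 : 0 ≤ i := by
        have hi' := (PySem.Set.mem_ofList _ _).mp hi
        obtain ⟨p, hp, hpi⟩ := List.mem_map.mp hi'
        have hpw : PySem.Str.endswith p "*" = true := (List.mem_filter.mp hp).2
        have : ['*'] <:+ p.toList := by simpa [PySem.Chars.endswith_iff] using hpw
        have h1 : 1 ≤ p.toList.length := by
          obtain ⟨q, hq⟩ := this
          simp [← hq]
        rw [← hpi]
        simp only [PySem.Str.len_eq]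
        omega
      exact ⟨_, (hc _).mp hmem, match_probe target i h0⟩
  · rintro ⟨a, hal, hm⟩
    rcases probe_of_match target a hm with ⟨rfl, hne⟩ | ⟨i, h0, hle, rfl⟩
    · have hcond : ((!PySem.Str.endswith a "*") && PySem.Set.contains (PySem.Set.ofList l) a) = true := by
        rw [Bool.and_eq_true]
        exact ⟨by simpa using hne, (hc a).mpr hal⟩
      rw [if_pos hcond]
    · set a := String.ofList (PySem.List.slice target.toList none (some i) ++ ['*']) with ha
      have hlen : PySem.Str.len a - 1 = i := by
        rw [ha]
        simp only [PySem.Str.len_eq]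
        rw [PySem.List.slice_to _ h0]
        have : (target.toList.take i.toNat).length = i.toNat := by
          rw [List.length_take]
          omega
        simp [this]
        omega
      have haw : PySem.Str.endswith a "*" = true := by
        rw [ha]
        simp [PySem.Chars.endswith_iff]
      have hmemlen : i ∈ PySem.Set.ofList
          (((PySem.Set.ofList l).filter (fun p => PySem.Str.endswith p "*")).map
            (fun p => PySem.Str.len p - 1)) := by
        rw [PySem.Set.mem_ofList]
        refine List.mem_map.mpr ⟨a, List.mem_filter.mpr ⟨?_, haw⟩, hlen⟩
        simpa [PySem.Set.mem_ofList] using hal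
      have hany : (PySem.Set.ofList
          (((PySem.Set.ofList l).filter (fun p => PySem.Str.endswith p "*")).map
            (fun p => PySem.Str.len p - 1))).any (fun j =>
          decide (j ≤ PySem.Str.len target) &&
          PySem.Set.contains (PySem.Set.ofList l)
            (String.ofList (PySem.List.slice target.toList none (some j) ++ ['*']))) = true := by
        refine List.any_eq_true.mpr ⟨i, hmemlen, ?_⟩
        rw [Bool.and_eq_true]
        refine ⟨?_, (hc a).mpr hal⟩
        simp only [PySem.Str.len_eq]
        simpa using hle
      split_ifs
      · rfl
      · exact hany

-- ===== VERDICT (by name: the statement is the Claim_ definition above) =====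
theorem is_target_allowed_py_spec : Claim_equal_is_target_allowed_py := by
  intro target l _
  show is_target_allowed_py target l = is_target_allowed_py_alt target l
  have hA : is_target_allowed_py target l = l.any (pvMatch target) := by
    rw [is_target_allowed_py]
    split_ifs with h
    · have hm : "*" ∈ l := by simpa using h
      exact (List.any_eq_true.mpr ⟨"*", hm, match_star target⟩).symm
    · exact loopA_eq_any target l
  have hB := alt_iff target l
  rw [hA]
  rw [Bool.eq_iff_iff, List.any_eq_true]
  exact hB.symm
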